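-- pv_equiv track=rewrite | github.com/shreya-pi/Accelerator_Startup_Kit | Data_Duplication/helper_scripts/extract_schema.py | preprocess_schema
-- ===== SOURCE A (Python) =====
-- def preprocess_schema(schema_details):
--     processed_schema = []
--     table_columns = {}
--
--     for row in schema_details:
--         schema, table, column, data_type, is_nullable, max_length = row
--
--         null_status = "NOT NULL" if is_nullable == "NO" else "NULL"
--         length_info = f'({max_length})' if max_length is not None else ''
--         column_entry = f'{column} ({data_type.lower()}{length_info}, {null_status})'
--
--         table_key = f'{schema}.{table}'
--         table_columns.setdefault(table_key, []).append(f'- {column_entry}')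
--
--     for table, columns in table_columns.items():
--         processed_schema.append(f'Table: {table}')
--         processed_schema.append('Columns:')
--         processed_schema.extend(columns)
--         processed_schema.append('')
--
--     return processed_schema
-- ===== SOURCE B (Python) =====
-- def preprocess_schema(schema_details):
--     keys = list(dict.fromkeys(f'{row[0]}.{row[1]}' for row in schema_details))
--     out = []
--     for key in keys:
--         out.append(f'Table: {key}')
--         out.append('Columns:')
--         out.extend(
--             f'- {column} ({data_type.lower()}{f"({max_length})" if max_length is not None else ""}, {"NOT NULL" if is_nullable == "NO" else "NULL"})'
--             for schema, table, column, data_type, is_nullable, max_length in schema_details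
--             if f'{schema}.{table}' == key
--         )
--         out.append('')
--     return out
-- ===== Notes on version B (the rewrite author's own statement) =====
-- stated objective: alternative
-- what changed: B drops the grouping dict entirely: it first collects the ordered list of distinct 'schema.table' keys, then rescans all rows per key to emit each table's block.
import Mathlib
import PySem

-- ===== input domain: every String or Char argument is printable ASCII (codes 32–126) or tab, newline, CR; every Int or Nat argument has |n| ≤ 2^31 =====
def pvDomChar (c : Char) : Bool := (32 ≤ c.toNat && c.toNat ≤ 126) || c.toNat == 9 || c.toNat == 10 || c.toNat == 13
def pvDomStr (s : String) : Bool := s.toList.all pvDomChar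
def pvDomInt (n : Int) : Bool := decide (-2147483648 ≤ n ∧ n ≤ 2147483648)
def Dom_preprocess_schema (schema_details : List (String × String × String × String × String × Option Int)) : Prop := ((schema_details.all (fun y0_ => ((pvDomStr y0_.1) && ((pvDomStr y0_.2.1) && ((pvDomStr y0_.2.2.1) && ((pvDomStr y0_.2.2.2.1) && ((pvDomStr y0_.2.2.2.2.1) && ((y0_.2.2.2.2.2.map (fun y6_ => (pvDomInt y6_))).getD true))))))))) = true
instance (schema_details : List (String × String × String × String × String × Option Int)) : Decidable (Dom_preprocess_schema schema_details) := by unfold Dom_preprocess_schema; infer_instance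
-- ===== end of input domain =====

-- B replaces A's grouping dict by an ordered dedup of the table keys followed by a per-key rescan of the rows (alternative decomposition, same output).


-- ===== PORT A =====
-- one pass: group the formatted column lines by 'schema.table' in an insertion-ordered dict, then emit per table
def preprocess_schema (schema_details : List (String × String × String × String × String × Option Int)) : List String :=
  (schema_details.foldl (fun (tc : PySem.Dict String (List String)) row =>
      let null_status := if row.2.2.2.2.1 == "NO" then "NOT NULL" else "NULL"
      let length_info := match row.2.2.2.2.2 with
        | some n => "(" ++ PySem.Int.toStr n ++ ")"
        | none => ""
      let column_entry := row.2.2.1 ++ " (" ++ PySem.Str.lower row.2.2.2.1 ++ length_info ++ ", " ++ null_status ++ ")"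
      let table_key := row.1 ++ "." ++ row.2.1
      -- table_columns.setdefault(table_key, []).append(…) : d[k] = d.get(k, []) + [line]
      tc.modify table_key [] (fun cs => cs ++ ["- " ++ column_entry]))
      PySem.Dict.empty).items.foldl
    (fun ps p => ((ps ++ ["Table: " ++ p.1]) ++ ["Columns:"]) ++ p.2 ++ [""]) []

-- ===== PORT B =====
-- ordered list of distinct table keys first, then rescan all rows per key; no dict
def preprocess_schema_alt (schema_details : List (String × String × String × String × String × Option Int)) : List String :=
  (PySem.List.dedup (schema_details.map (fun row => row.1 ++ "." ++ row.2.1))).foldl (fun out key =>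
    ((out ++ ["Table: " ++ key]) ++ ["Columns:"]) ++
      ((schema_details.filter (fun row => (row.1 ++ "." ++ row.2.1) == key)).map
        (fun row =>
          "- " ++ (row.2.2.1 ++ " (" ++ PySem.Str.lower row.2.2.2.1 ++
            (match row.2.2.2.2.2 with
              | some n => "(" ++ PySem.Int.toStr n ++ ")"
              | none => "") ++
            ", " ++ (if row.2.2.2.2.1 == "NO" then "NOT NULL" else "NULL") ++ ")"))) ++ [""]) []

-- ===== PRECONDITION & SPEC =====
def Spec_preprocess_schema (schema_details : List (String × String × String × String × String × Option Int)) (out : List String) : Prop := out = preprocess_schema_alt schema_details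
instance (schema_details : List (String × String × String × String × String × Option Int)) (out : List String) : Decidable (Spec_preprocess_schema schema_details out) := by unfold Spec_preprocess_schema; infer_instance

-- ===== CLAIM (what is proved, stated in full; the proofs are below) =====
def Claim_equal_preprocess_schema : Prop := ∀ (schema_details : List (String × String × String × String × String × Option Int)), Dom_preprocess_schema schema_details → Spec_preprocess_schema schema_details (preprocess_schema schema_details)

-- ===== LEMMAS AND PROOFS =====

-- the table key and the formatted column line of one row (proof-side abbreviations)
def pvKey (r : String × String × String × String × String × Option Int) : String := r.1 ++ "." ++ r.2.1
def pvLine (r : String × String × String × String × String × Option Int) : String :=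
  "- " ++ (r.2.2.1 ++ " (" ++ PySem.Str.lower r.2.2.2.1 ++
    (match r.2.2.2.2.2 with
      | some n => "(" ++ PySem.Int.toStr n ++ ")"
      | none => "") ++
    ", " ++ (if r.2.2.2.2.1 == "NO" then "NOT NULL" else "NULL") ++ ")")

-- A's grouping dict, written as a fold over the (key, line) pairs
def pvDictA (sd : List (String × String × String × String × String × Option Int)) : PySem.Dict String (List String) :=
  (sd.map (fun r => (pvKey r, pvLine r))).foldl (fun d p => d.modify p.1 [] (fun cs => cs ++ [p.2])) PySem.Dict.empty

lemma pvDictA_def (sd : List (String × String × String × String × String × Option Int)) :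
    pvDictA sd = sd.foldl (fun tc row =>
      tc.modify (row.1 ++ "." ++ row.2.1) [] (fun cs => cs ++ [pvLine row])) PySem.Dict.empty := by
  simp [pvDictA, List.foldl_map, pvKey]

lemma pvDictA_keys (sd : List (String × String × String × String × String × Option Int)) :
    (pvDictA sd).keys = PySem.Set.ofList (sd.map pvKey) := by
  unfold pvDictA
  rw [PySem.Dict.keys_foldl_modify_key (l := sd.map (fun r => (pvKey r, pvLine r)))
        (key := fun p => p.1) (d0 := ([] : List String)) (f := fun d p => fun cs => cs ++ [p.2])]
  simp [List.map_map, Function.comp_def, PySem.Set.update_nil_left, PySem.Dict.keys_empty]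

lemma pvDictA_getD (sd : List (String × String × String × String × String × Option Int)) (k : String) :
    (pvDictA sd).getD k [] = (sd.filter (fun r => pvKey r == k)).map pvLine := by
  unfold pvDictA
  rw [PySem.Dict.getD_foldl_modify_append]
  simp [PySem.Dict.getD_empty, List.filter_map, Function.comp_def, List.map_map]

lemma pvDictA_items (sd : List (String × String × String × String × String × Option Int)) :
    (pvDictA sd).items = (PySem.List.dedup (sd.map pvKey)).map
      (fun k => (k, (sd.filter (fun r => pvKey r == k)).map pvLine)) := by
  have hnd : (pvDictA sd).keys.Nodup := by
    rw [pvDictA_keys]; exact PySem.Set.nodup_ofList _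
  rw [PySem.Dict.items_eq_map_keys (pvDictA sd) hnd []]
  rw [pvDictA_keys]
  simp only [PySem.List.dedup_eq_ofList]
  exact List.map_congr_left (fun k _ => by rw [pvDictA_getD])

theorem preprocess_schema_spec : Claim_equal_preprocess_schema := by
  intro sd _
  show preprocess_schema sd = preprocess_schema_alt sd
  unfold preprocess_schema preprocess_schema_alt
  rw [show (sd.foldl (fun tc row =>
      let null_status := if row.2.2.2.2.1 == "NO" then "NOT NULL" else "NULL"
      let length_info := match row.2.2.2.2.2 with
        | some n => "(" ++ PySem.Int.toStr n ++ ")"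
        | none => ""
      let column_entry := row.2.2.1 ++ " (" ++ PySem.Str.lower row.2.2.2.1 ++ length_info ++ ", " ++ null_status ++ ")"
      let table_key := row.1 ++ "." ++ row.2.1
      tc.modify table_key [] (fun cs => cs ++ ["- " ++ column_entry])) PySem.Dict.empty)
      = pvDictA sd from by rw [pvDictA_def]; rfl]
  rw [pvDictA_items]
  rw [List.foldl_map]
  rfl
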